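-- pv_equiv track=rewrite | github.com/spossner/adventofcode-2017 | 04.py | solve
-- ===== SOURCE A (Python) =====
-- def solve(data, modified=False):
--     if type(data) is not list:
--         data = [data]
--
--     #CODE HERE
--     result = 0
--     for passphrase in data:
--         words = passphrase.split()
--         if modified:
--             for i in range(len(words)):
--                 words[i] = ''.join(sorted(words[i]))
--         unique = set(words)
--         if len(words) == len(unique):
--             result += 1
--
--     return result
-- ===== SOURCE B (Python) =====
-- def solve(data, modified=False):
--     if type(data) is not list:
--         data = [data]
--
--     result = 0
--     for passphrase in data:
--         words = passphrase.split()
--         if modified: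
--             words = [''.join(sorted(w)) for w in words]
--         words.sort()
--         if all(words[i] != words[i - 1] for i in range(1, len(words))):
--             result += 1
--     return result
-- ===== Notes on version B (the rewrite author's own statement) =====
-- stated objective: alternative
-- what changed: Duplicate words are detected by sorting each passphrase's word list and scanning once for an equal adjacent pair, instead of building a hash set and comparing lengths.
import Mathlib
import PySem

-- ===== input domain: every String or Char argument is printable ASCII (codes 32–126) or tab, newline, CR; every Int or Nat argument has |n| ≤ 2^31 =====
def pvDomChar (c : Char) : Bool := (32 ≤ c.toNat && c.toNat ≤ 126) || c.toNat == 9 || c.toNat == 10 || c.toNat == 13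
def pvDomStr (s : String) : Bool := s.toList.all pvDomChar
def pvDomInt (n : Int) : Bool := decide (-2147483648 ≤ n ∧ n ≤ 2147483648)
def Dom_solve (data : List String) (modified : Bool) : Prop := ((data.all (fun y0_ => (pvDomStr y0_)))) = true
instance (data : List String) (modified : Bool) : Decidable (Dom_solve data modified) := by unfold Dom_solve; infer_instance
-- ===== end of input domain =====

-- B detects duplicate words by sorting each word list and scanning adjacent pairs, instead of a set-vs-list length comparison (alternative decomposition, same results).


-- ===== PORT A =====
-- ''.join(sorted(w)) : the string of w's characters in sorted order (exact: join with '' concatenates the 1-char strings)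
def sortWord (w : String) : String := String.ofList (PySem.List.sorted w.toList (fun c => c) false)

def solve (data : List String) (modified : Bool) : Int :=
  data.foldl
    (fun result passphrase =>
      let words := PySem.Str.split₀ passphrase
      let words := if modified then words.map sortWord else words
      let unique := PySem.Set.ofList words
      if words.length = PySem.Set.len unique then result + 1 else result)
    0

-- ===== PORT B =====
-- all(words[i] != words[i-1] for i in range(1, len(words))) : adjacent-pair scan
def noAdjDup : List String → Bool
  | [] => true
  | [_] => true
  | x :: y :: t => x ≠ y && noAdjDup (y :: t)

def solve_alt (data : List String) (modified : Bool) : Int :=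
  data.foldl
    (fun result passphrase =>
      let words := PySem.Str.split₀ passphrase
      let words := if modified then words.map sortWord else words
      let words := PySem.List.sorted words (fun w => w) false
      if noAdjDup words then result + 1 else result)
    0

-- ===== PRECONDITION & SPEC =====
def Spec_solve (data : List String) (modified : Bool) (out : Int) : Prop := out = solve_alt data modified
instance (data : List String) (modified : Bool) (out : Int) : Decidable (Spec_solve data modified out) := by unfold Spec_solve; infer_instance

-- ===== CLAIM (what is proved, stated in full; the proofs are below) =====
def Claim_equal_solve : Prop := ∀ (data : List String) (modified : Bool), Dom_solve data modified → Spec_solve data modified (solve data modified)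

-- ===== LEMMAS AND PROOFS =====

-- set(xs) (first occurrences) is a sublist of xs
theorem ofList_sublist {α : Type} [BEq α] [LawfulBEq α] (xs : List α) :
    (PySem.Set.ofList xs).Sublist xs := by
  induction xs using List.reverseRecOn with
  | nil => simp [PySem.Set.ofList_nil]
  | append_singleton ys y ih =>
    rw [PySem.Set.ofList_append_singleton, PySem.Set.add_eq_ite]
    split
    · exact ih.trans (List.sublist_append_left ys [y])
    · exact ih.append (List.Sublist.refl [y])

-- len(words) == len(set(words))  ↔  words has no duplicates
theorem lenEq_iff_nodup {α : Type} [BEq α] [LawfulBEq α] (xs : List α) :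
    xs.length = (PySem.Set.ofList xs).length ↔ xs.Nodup := by
  constructor
  · intro h
    have := (ofList_sublist xs).eq_of_length h.symm
    rw [← this]
    exact PySem.Set.nodup_ofList xs
  · intro h
    rw [PySem.Set.ofList_eq_self_of_nodup xs h]

-- adjacent scan on a ≤-sorted list decides Nodup
theorem noAdjDup_iff_nodup : ∀ (ws : List String), ws.Pairwise (· ≤ ·) →
    (noAdjDup ws = true ↔ ws.Nodup) := by
  intro ws
  induction ws with
  | nil => simp [noAdjDup]
  | cons x t ih =>
    cases t with
    | nil => simp [noAdjDup]
    | cons y t' =>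
      intro hp
      rcases List.pairwise_cons.mp hp with ⟨hx, hp'⟩
      rcases List.pairwise_cons.mp hp' with ⟨hy, _⟩
      simp only [noAdjDup, Bool.and_eq_true, decide_eq_true_eq, ih hp',
        List.nodup_cons, List.mem_cons]
      constructor
      · rintro ⟨hxy, hnd⟩
        refine ⟨fun hmem => ?_, hnd⟩
        rcases hmem with h | h
        · exact hxy h
        · exact absurd (hy x h)
            (not_le.mpr (lt_of_le_of_ne (hx y (List.mem_cons_self ..)) hxy))
      · rintro ⟨hmem, hnd⟩
        exact ⟨fun h => hmem (Or.inl h), hnd⟩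

-- per-passphrase conditions agree
theorem cond_eq (ws : List String) :
    ((ws.length : Int) = PySem.Set.len (PySem.Set.ofList ws)) ↔
    noAdjDup (PySem.List.sorted ws (fun w => w) false) = true := by
  have hperm := PySem.List.sorted_perm ws (fun w => w) false
  have hpw : (PySem.List.sorted ws (fun w => w) false).Pairwise (· ≤ ·) := by
    simpa using PySem.List.sorted_pairwise ws (fun w => w)
  rw [show PySem.Set.len (PySem.Set.ofList ws) = ((PySem.Set.ofList ws).length : Int) from rfl,
    Int.natCast_inj, lenEq_iff_nodup ws, noAdjDup_iff_nodup _ hpw]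
  exact (hperm.nodup_iff).symm

-- the two per-passphrase loop bodies agree, so the folds agree from any accumulator
theorem foldl_eq (modified : Bool) : ∀ (l : List String) (init : Int),
    l.foldl
      (fun result passphrase =>
        let words := PySem.Str.split₀ passphrase
        let words := if modified then words.map sortWord else words
        let unique := PySem.Set.ofList words
        if words.length = PySem.Set.len unique then result + 1 else result) init =
    l.foldl
      (fun result passphrase =>
        let words := PySem.Str.split₀ passphrase
        let words := if modified then words.map sortWord else words
        let words := PySem.List.sorted words (fun w => w) false
        if noAdjDup words then result + 1 else result) init := by
  intro l
  induction l with
  | nil => intro init; rfl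
  | cons p t ih =>
    intro init
    simp only [List.foldl_cons]
    rw [← ih]
    congr 1
    show (if ((if modified then (PySem.Str.split₀ p).map sortWord else PySem.Str.split₀ p).length : Int)
            = PySem.Set.len (PySem.Set.ofList (if modified then (PySem.Str.split₀ p).map sortWord else PySem.Str.split₀ p))
          then init + 1 else init)
        = (if noAdjDup (PySem.List.sorted (if modified then (PySem.Str.split₀ p).map sortWord else PySem.Str.split₀ p) (fun w => w) false)
          then init + 1 else init)
    set ws := if modified then (PySem.Str.split₀ p).map sortWord else PySem.Str.split₀ p with hws
    by_cases h : (ws.length : Int) = PySem.Set.len (PySem.Set.ofList ws)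
    · rw [if_pos h, if_pos ((cond_eq ws).mp h)]
    · rw [if_neg h, if_neg (fun hb => h ((cond_eq ws).mpr hb))]

-- ===== VERDICT (by name: the statement is the Claim_ definition above) =====
theorem solve_spec : Claim_equal_solve := by
  intro data modified _
  unfold Spec_solve solve solve_alt
  exact foldl_eq modified data 0
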